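-- pv_equiv track=rewrite | github.com/MiquelIndia/AdventOfCode | days/exercise4.py | _get_diagonal_lines
-- ===== SOURCE A (Python) =====
-- def _get_diagonal_lines(lines = list()) -> list:
--     diagonal_lines = list()
--     max_length = max(len(line) for line in lines)
--
--     # Get diagonals from top-left to bottom-right
--     for d in range(-len(lines) + 1, max_length):
--         diagonal_line = ""
--         for i in range(len(lines)):
--             j = i + d
--             if 0 <= j < len(lines[i]):
--                 diagonal_line += lines[i][j]
--         if diagonal_line:
--             diagonal_lines.append(diagonal_line)
--
--     # Get diagonals from top-right to bottom-left
--     for d in range(-len(lines) + 1, max_length):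
--         diagonal_line = ""
--         for i in range(len(lines)):
--             j = len(lines[i]) - 1 - i - d
--             if 0 <= j < len(lines[i]):
--                 diagonal_line += lines[i][j]
--         if diagonal_line:
--             diagonal_lines.append(diagonal_line)
--
--     return diagonal_lines
-- ===== SOURCE B (Python) =====
-- def _bucket_lines(lines, lo, size, key):
--     buckets = [""] * size
--     for i, line in enumerate(lines):
--         for j, ch in enumerate(line):
--             buckets[key(i, j, len(line)) - lo] += ch
--     return [s for s in buckets if s]
--
--
-- def _get_diagonal_lines(lines = list()) -> list:
--     max_length = max(len(line) for line in lines)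
--     lo = 1 - len(lines)
--     size = len(lines) - 1 + max_length
--     return (_bucket_lines(lines, lo, size, lambda i, j, m: j - i)
--             + _bucket_lines(lines, lo, size, lambda i, j, m: m - 1 - i - j))
-- ===== Notes on version B (the rewrite author's own statement) =====
-- stated objective: faster
-- what changed: Instead of rescanning every row once per candidate offset (two nested loops over offsets x rows), B makes one pass over the grid's characters per direction, bucketing each char by its diagonal/antidiagonal offset, then emits non-empty buckets in offset order.
-- outside the precondition, e.g. on _get_diagonal_lines([]): A raises ValueError, B raises ValueError
import Mathlib
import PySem

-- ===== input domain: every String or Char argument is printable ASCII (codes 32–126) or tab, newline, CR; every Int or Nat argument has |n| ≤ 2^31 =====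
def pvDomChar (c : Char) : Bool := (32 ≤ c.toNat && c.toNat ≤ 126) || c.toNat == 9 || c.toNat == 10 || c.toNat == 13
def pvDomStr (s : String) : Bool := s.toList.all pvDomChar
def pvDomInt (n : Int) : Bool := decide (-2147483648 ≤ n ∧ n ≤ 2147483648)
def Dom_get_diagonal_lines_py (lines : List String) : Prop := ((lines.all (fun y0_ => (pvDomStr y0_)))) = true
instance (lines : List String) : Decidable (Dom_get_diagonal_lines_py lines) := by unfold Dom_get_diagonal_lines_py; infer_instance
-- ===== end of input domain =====

-- B replaces A's per-offset rescans of every row by one pass that buckets each character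
-- into its diagonal/antidiagonal offset; objective: faster (single pass per direction).
-- Pre_ excludes only lines = [], where A raises ValueError (max() of an empty sequence).


-- ===== PORT A =====
-- literal transliteration of A: for each offset d, rescan all rows collecting the char at
-- j = i + d (resp. j = len(line)-1-i-d); append the diagonal string if nonempty.
-- Strings are built as List Char (PySem's string model) and packed with String.ofList at append time.
def get_diagonal_lines_py (lines : List String) : List String :=
  -- max(len(line) for line in lines): raises ValueError on lines = [] (excluded by Pre_; getD unreached)
  let maxLength : Int := (PySem.List.max? (lines.map PySem.Str.len) (fun x => x)).getD 0
  let n : Int := PySem.List.len lines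
  let dl1 : List String :=
    (PySem.List.pyRange (-n + 1) maxLength 1).foldl (fun acc d =>
      let dline : List Char :=
        (PySem.List.pyRange 0 n 1).foldl (fun s i =>
          let line := PySem.List.pyGetD lines i ""
          let j := i + d
          -- i ranges over range(len(lines)) and j is guarded, so pyGetD is exact here
          if 0 ≤ j ∧ j < PySem.Str.len line then s ++ [PySem.List.pyGetD line.toList j ' '] else s) []
      if dline ≠ [] then acc ++ [String.ofList dline] else acc) []
  let dl2 : List String :=
    (PySem.List.pyRange (-n + 1) maxLength 1).foldl (fun acc d =>
      let dline : List Char :=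
        (PySem.List.pyRange 0 n 1).foldl (fun s i =>
          let line := PySem.List.pyGetD lines i ""
          let j := PySem.Str.len line - 1 - i - d
          if 0 ≤ j ∧ j < PySem.Str.len line then s ++ [PySem.List.pyGetD line.toList j ' '] else s) []
      if dline ≠ [] then acc ++ [String.ofList dline] else acc) dl1
  dl2

-- ===== PORT B =====
-- _bucket_lines: one pass over all cells, each char appended to the bucket of its offset
-- key(i,j,len(line)); buckets are emitted in offset order, empty ones dropped.
def pvBucketLines (lines : List String) (lo size : Int) (key : Int → Int → Int → Int) : List String :=
  let buckets : List (List Char) := List.replicate size.toNat []   -- [""] * size  (size ≥ 0 whenever lines ≠ [])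
  let buckets :=
    (PySem.List.enumerate lines 0).foldl (fun bs p =>
      (PySem.List.enumerate p.2.toList 0).foldl (fun bs q =>
        let idx := key p.1 q.1 (PySem.Str.len p.2) - lo
        -- idx is always in [0, size), so list indexing/assignment is exact
        PySem.List.pySetD bs idx (PySem.List.pyGetD bs idx [] ++ [q.2])) bs) buckets
  (buckets.filter (fun s => s ≠ [])).map String.ofList

def get_diagonal_lines_py_alt (lines : List String) : List String :=
  let maxLength : Int := (PySem.List.max? (lines.map PySem.Str.len) (fun x => x)).getD 0
  let lo : Int := 1 - PySem.List.len lines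
  let size : Int := PySem.List.len lines - 1 + maxLength
  pvBucketLines lines lo size (fun i j _ => j - i)
    ++ pvBucketLines lines lo size (fun i j m => m - 1 - i - j)

-- ===== PRECONDITION & SPEC =====
-- Pre_ excludes exactly lines = [], where Python A raises ValueError (max() of empty sequence).
def Pre_get_diagonal_lines_py (lines : List String) : Prop := lines ≠ []
instance (lines : List String) : Decidable (Pre_get_diagonal_lines_py lines) := by
  unfold Pre_get_diagonal_lines_py; infer_instance
def pvWitness_get_diagonal_lines_py : List String := ["ab", "cd"]

def Spec_get_diagonal_lines_py (lines : List String) (out : List String) : Prop := out = get_diagonal_lines_py_alt lines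
instance (lines : List String) (out : List String) : Decidable (Spec_get_diagonal_lines_py lines out) := by unfold Spec_get_diagonal_lines_py; infer_instance

-- ===== CLAIM (what is proved, stated in full; the proofs are below) =====
def Claim_equal_get_diagonal_lines_py : Prop := ∀ (lines : List String), Dom_get_diagonal_lines_py lines → Pre_get_diagonal_lines_py lines → Spec_get_diagonal_lines_py lines (get_diagonal_lines_py lines)

-- ===== LEMMAS AND PROOFS =====

theorem pvCharFold (cs : List Char) (j0 : Int) (bs : List (List Char)) (f : Int → Int) (k : Nat) (gv : Int)
    (Hb : ∀ j : Int, j0 ≤ j → j < j0 + cs.length → 0 ≤ f j ∧ f j < bs.length)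
    (Hk : ∀ j : Int, j0 ≤ j → j < j0 + cs.length → (f j = (k : Int) ↔ j = gv)) :
    ((PySem.List.enumerate cs j0).foldl
        (fun bs q => PySem.List.pySetD bs (f q.1) (PySem.List.pyGetD bs (f q.1) [] ++ [q.2])) bs).getD k []
      = bs.getD k [] ++ (if j0 ≤ gv ∧ gv < j0 + cs.length then [cs.getD (gv - j0).toNat ' '] else []) := by
  induction cs generalizing j0 bs with
  | nil =>
      simp [PySem.List.enumerate_nil]
  | cons c cs ih =>
      have hlen : (c :: cs).length = cs.length + 1 := rfl
      rw [PySem.List.enumerate_cons, List.foldl_cons]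
      have hb0 := Hb j0 le_rfl (by omega)
      have hk0 := Hk j0 le_rfl (by omega)
      have hset : PySem.List.pySetD bs (f j0) (PySem.List.pyGetD bs (f j0) [] ++ [c])
          = bs.set (f j0).toNat (PySem.List.pyGetD bs (f j0) [] ++ [c]) := by
        rw [PySem.List.pySetD_of_nonneg] ; exact hb0.1
      rw [hset]
      rw [ih (j0 + 1) _
          (fun j hj1 hj2 => by rw [List.length_set]; exact Hb j (by omega) (by omega))
          (fun j hj1 hj2 => by exact Hk j (by omega) (by omega))]
      by_cases hgv : gv = j0
      · subst hgv
        have hfk : f gv = (k : Int) := hk0.mpr rfl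
        have hklt : k < bs.length := by omega
        have h1 : (bs.set (f gv).toNat (PySem.List.pyGetD bs (f gv) [] ++ [c])).getD k []
            = PySem.List.pyGetD bs (f gv) [] ++ [c] := by
          rw [hfk]
          simp [List.getD, hklt]
        rw [h1, hfk]
        have h2 : PySem.List.pyGetD bs ((k : Nat) : Int) [] = bs.getD k [] := by
          simp
        rw [h2]
        have hc1 : ¬ (gv + 1 ≤ gv ∧ gv < gv + 1 + (cs.length : Int)) := by omega
        have hc2 : (gv ≤ gv ∧ gv < gv + (((c :: cs).length : Nat) : Int)) := by omega
        rw [if_neg hc1, if_pos hc2]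
        simp
      · have hfk : f j0 ≠ (k : Int) := fun h => hgv (hk0.mp h).symm
        have h1 : (bs.set (f j0).toNat (PySem.List.pyGetD bs (f j0) [] ++ [c])).getD k []
            = bs.getD k [] := by
          simp only [List.getD, List.getElem?_set]
          rw [if_neg (by omega)]
        rw [h1]
        congr 1
        by_cases hin : j0 + 1 ≤ gv ∧ gv < j0 + 1 + (cs.length : Int)
        · have hin' : j0 ≤ gv ∧ gv < j0 + (((c :: cs).length : Nat) : Int) := by omega
          rw [if_pos hin, if_pos hin']
          have h3 : (gv - j0).toNat = (gv - (j0+1)).toNat + 1 := by omega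
          simp [h3]
        · have hin' : ¬ (j0 ≤ gv ∧ gv < j0 + (((c :: cs).length : Nat) : Int)) := by omega
          rw [if_neg hin, if_neg hin']

theorem pvCharFold_length (cs : List Char) (j0 : Int) (bs : List (List Char)) (f : Int → Int) :
    ((PySem.List.enumerate cs j0).foldl
        (fun bs q => PySem.List.pySetD bs (f q.1) (PySem.List.pyGetD bs (f q.1) [] ++ [q.2])) bs).length
      = bs.length := by
  induction cs generalizing j0 bs with
  | nil => simp [PySem.List.enumerate_nil]
  | cons c cs ih =>
      rw [PySem.List.enumerate_cons, List.foldl_cons, ih]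
      exact PySem.List.length_pySetD _ _ _

def pvCell (line : String) (gv : Int) : List Char :=
  if 0 ≤ gv ∧ gv < PySem.Str.len line then [PySem.List.pyGetD line.toList gv ' '] else []

theorem pvRowsFold (rows : List (Int × String)) (bs : List (List Char)) (lo : Int)
    (key : Int → Int → Int → Int) (k : Nat) (gv : Int → String → Int)
    (Hb : ∀ p ∈ rows, ∀ j : Int, 0 ≤ j → j < PySem.Str.len p.2 →
        0 ≤ key p.1 j (PySem.Str.len p.2) - lo ∧ key p.1 j (PySem.Str.len p.2) - lo < bs.length)
    (Hk : ∀ p ∈ rows, ∀ j : Int, 0 ≤ j → j < PySem.Str.len p.2 →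
        (key p.1 j (PySem.Str.len p.2) - lo = (k : Int) ↔ j = gv p.1 p.2)) :
    (rows.foldl (fun bs p => (PySem.List.enumerate p.2.toList 0).foldl
        (fun bs q => PySem.List.pySetD bs (key p.1 q.1 (PySem.Str.len p.2) - lo)
          (PySem.List.pyGetD bs (key p.1 q.1 (PySem.Str.len p.2) - lo) [] ++ [q.2])) bs) bs).getD k []
      = bs.getD k [] ++ rows.flatMap (fun p => pvCell p.2 (gv p.1 p.2)) := by
  induction rows generalizing bs with
  | nil => simp
  | cons p rows ih =>
      rw [List.foldl_cons, List.flatMap_cons]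
      have hlenstr : PySem.Str.len p.2 = (p.2.toList.length : Int) := by
        simp [PySem.Str.len_eq]
      rw [ih _ (fun q hq j hj1 hj2 => by
            rw [pvCharFold_length p.2.toList 0 bs (fun j => key p.1 j (PySem.Str.len p.2) - lo)]
            exact Hb q (by simp [hq]) j hj1 hj2)
          (fun q hq j hj1 hj2 => Hk q (by simp [hq]) j hj1 hj2)]
      rw [pvCharFold p.2.toList 0 bs (fun j => key p.1 j (PySem.Str.len p.2) - lo) k (gv p.1 p.2)
          (fun j hj1 hj2 => Hb p (by simp) j hj1 (by omega))
          (fun j hj1 hj2 => Hk p (by simp) j hj1 (by omega))]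
      rw [List.append_assoc]
      congr 2
      unfold pvCell
      by_cases h : 0 ≤ gv p.1 p.2 ∧ gv p.1 p.2 < PySem.Str.len p.2
      · rw [if_pos h, if_pos (by omega)]
        have : gv p.1 p.2 = (((gv p.1 p.2).toNat : Nat) : Int) := by omega
        rw [this, PySem.List.pyGetD_natCast]
        have hmax : max (gv p.1 p.2) 0 = gv p.1 p.2 := by omega
        simp [hmax]
      · rw [if_neg h, if_neg (by omega)]

theorem pvRowsFold_length (rows : List (Int × String)) (bs : List (List Char)) (lo : Int)
    (key : Int → Int → Int → Int) :
    (rows.foldl (fun bs p => (PySem.List.enumerate p.2.toList 0).foldl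
        (fun bs q => PySem.List.pySetD bs (key p.1 q.1 (PySem.Str.len p.2) - lo)
          (PySem.List.pyGetD bs (key p.1 q.1 (PySem.Str.len p.2) - lo) [] ++ [q.2])) bs) bs).length
      = bs.length := by
  induction rows generalizing bs with
  | nil => simp
  | cons p rows ih =>
      rw [List.foldl_cons, ih,
        pvCharFold_length p.2.toList 0 bs (fun j => key p.1 j (PySem.Str.len p.2) - lo)]

def pvDiagList (lines : List String) (g : Int → String → Int) : List Char :=
  (PySem.List.enumerate lines 0).flatMap (fun p => pvCell p.2 (g p.1 p.2))

theorem pvBucketLines_eq (lines : List String) (lo size : Int) (key : Int → Int → Int → Int)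
    (gv : Nat → Int → String → Int)
    (Hb : ∀ p ∈ PySem.List.enumerate lines 0, ∀ j : Int, 0 ≤ j → j < PySem.Str.len p.2 →
        0 ≤ key p.1 j (PySem.Str.len p.2) - lo ∧ key p.1 j (PySem.Str.len p.2) - lo < size)
    (Hk : ∀ k : Nat, (k : Int) < size → ∀ p ∈ PySem.List.enumerate lines 0, ∀ j : Int,
        0 ≤ j → j < PySem.Str.len p.2 →
        (key p.1 j (PySem.Str.len p.2) - lo = (k : Int) ↔ j = gv k p.1 p.2)) :
    pvBucketLines lines lo size key
      = ((List.range size.toNat).filter (fun k => decide (pvDiagList lines (gv k) ≠ []))).map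
          (fun k => String.ofList (pvDiagList lines (gv k))) := by
  simp only [pvBucketLines]
  have hrepl : (List.replicate size.toNat ([] : List Char)).length = size.toNat := by simp
  have hfin : ((PySem.List.enumerate lines 0).foldl (fun bs p =>
      (PySem.List.enumerate p.2.toList 0).foldl
        (fun bs q => PySem.List.pySetD bs (key p.1 q.1 (PySem.Str.len p.2) - lo)
          (PySem.List.pyGetD bs (key p.1 q.1 (PySem.Str.len p.2) - lo) [] ++ [q.2])) bs)
      (List.replicate size.toNat ([] : List Char)))
      = (List.range size.toNat).map (fun k => pvDiagList lines (gv k)) := by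
    apply List.ext_getElem
    · rw [pvRowsFold_length, hrepl]; simp
    · intro k h1 h2
      have hklen : k < size.toNat := by
        rw [pvRowsFold_length, hrepl] at h1; exact h1
      have hksz : (k : Int) < size := by omega
      have := pvRowsFold (PySem.List.enumerate lines 0)
          (List.replicate size.toNat ([] : List Char)) lo key k (gv k)
          (fun p hp j hj1 hj2 => by
            rw [hrepl]
            have := Hb p hp j hj1 hj2
            omega)
          (Hk k hksz)
      rw [List.getElem_eq_getD []]
      rw [this]
      simp [pvDiagList]
  rw [hfin]
  rw [List.filter_map, List.map_map]
  rfl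

theorem pvInnerA_eq1 (lines : List String) (d : Int) :
    (PySem.List.pyRange 0 (PySem.List.len lines) 1).foldl
      (fun s i =>
        if 0 ≤ i + d ∧ i + d < PySem.Str.len (PySem.List.pyGetD lines i "")
        then s ++ [PySem.List.pyGetD (PySem.List.pyGetD lines i "").toList (i + d) ' '] else s) []
      = pvDiagList lines (fun i line => i + d) := by
  rw [PySem.List.foldl_congr_mem _ _
      (fun s i => s ++ pvCell (PySem.List.pyGetD lines i "") (i + d)) _
      (fun acc x hx => by unfold pvCell; split_ifs <;> simp_all [PySem.Str.len_eq])]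
  rw [PySem.List.foldl_append_eq_flatMap]
  unfold pvDiagList
  rw [PySem.List.enumerate_eq_map_pyRange lines ""]
  rw [List.flatMap_map]
  simp

theorem pvInnerA_eq2 (lines : List String) (d : Int) :
    (PySem.List.pyRange 0 (PySem.List.len lines) 1).foldl
      (fun s i =>
        if 0 ≤ PySem.Str.len (PySem.List.pyGetD lines i "") - 1 - i - d ∧
            PySem.Str.len (PySem.List.pyGetD lines i "") - 1 - i - d < PySem.Str.len (PySem.List.pyGetD lines i "")
        then s ++ [PySem.List.pyGetD (PySem.List.pyGetD lines i "").toList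
            (PySem.Str.len (PySem.List.pyGetD lines i "") - 1 - i - d) ' '] else s) []
      = pvDiagList lines (fun i line => PySem.Str.len line - 1 - i - d) := by
  rw [PySem.List.foldl_congr_mem _ _
      (fun s i => s ++ pvCell (PySem.List.pyGetD lines i "")
        (PySem.Str.len (PySem.List.pyGetD lines i "") - 1 - i - d)) _
      (fun acc x hx => by unfold pvCell; split_ifs <;> simp_all [PySem.Str.len_eq])]
  rw [PySem.List.foldl_append_eq_flatMap]
  unfold pvDiagList
  rw [PySem.List.enumerate_eq_map_pyRange lines ""]
  rw [List.flatMap_map]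
  simp

-- ===== VERDICT (by name: the statement is the Claim_ definition above) =====
theorem get_diagonal_lines_py_spec : Claim_equal_get_diagonal_lines_py := by
  intro lines _hdom hpre
  unfold Spec_get_diagonal_lines_py
  have hne : lines ≠ [] := hpre
  obtain ⟨M, hM⟩ : ∃ M, PySem.List.max? (lines.map PySem.Str.len) (fun x => x) = some M := by
    cases h : PySem.List.max? (lines.map PySem.Str.len) (fun x => x) with
    | none =>
        exact absurd (List.map_eq_nil_iff.mp ((PySem.List.max?_eq_none_iff _ _).mp h)) hne
    | some m => exact ⟨m, rfl⟩
  have hMmax : ∀ l ∈ lines, PySem.Str.len l ≤ M := by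
    intro l hl
    simpa using PySem.List.max?_isMax hM (PySem.Str.len l) (List.mem_map_of_mem hl)
  have hM0 : 0 ≤ M := by
    obtain ⟨l0, hl0⟩ := List.exists_mem_of_ne_nil lines hne
    have h1 : (0 : Int) ≤ PySem.Str.len l0 := by simp [PySem.Str.len_eq]
    exact le_trans h1 (hMmax l0 hl0)
  have hn1 : 1 ≤ PySem.List.len lines := by
    rw [PySem.List.len_eq]
    exact_mod_cast List.length_pos_of_ne_nil hne
  have hmem : ∀ p ∈ PySem.List.enumerate lines 0,
      0 ≤ p.1 ∧ p.1 < PySem.List.len lines ∧ p.2 ∈ lines := by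
    intro p hp
    rw [PySem.List.mem_enumerate_iff] at hp
    obtain ⟨t, ht, rfl⟩ := hp
    refine ⟨by omega, ?_, by simp⟩
    rw [PySem.List.len_eq]
    omega
  show get_diagonal_lines_py lines = get_diagonal_lines_py_alt lines
  simp only [get_diagonal_lines_py, get_diagonal_lines_py_alt, hM, Option.getD_some]
  have hra : -PySem.List.len lines + 1 = 1 - PySem.List.len lines := by ring
  rw [hra]
  rw [PySem.List.foldl_append_ite, PySem.List.foldl_append_ite]
  simp only [pvInnerA_eq1, pvInnerA_eq2, List.nil_append]
  -- rewrite the d-range as indices into List.range size.toNat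
  rw [PySem.List.pyRange_one]
  have hsz : (M - (1 - PySem.List.len lines)).toNat
      = (PySem.List.len lines - 1 + M).toNat := by omega
  rw [hsz]
  rw [List.filter_map, List.filter_map, List.map_map, List.map_map]
  -- B side: the two bucket passes
  rw [pvBucketLines_eq lines (1 - PySem.List.len lines) (PySem.List.len lines - 1 + M)
      (fun i j _ => j - i)
      (fun k i line => i + ((1 - PySem.List.len lines) + (k : Int)))
      (fun p hp j hj1 hj2 => by
        have h1 := hmem p hp
        have h2 := hMmax p.2 h1.2.2
        dsimp only
        constructor <;> omega)
      (fun k hk p hp j hj1 hj2 => by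
        have h1 := hmem p hp
        dsimp only
        constructor <;> intro h <;> omega)]
  rw [pvBucketLines_eq lines (1 - PySem.List.len lines) (PySem.List.len lines - 1 + M)
      (fun i j m => m - 1 - i - j)
      (fun k i line => PySem.Str.len line - 1 - i - ((1 - PySem.List.len lines) + (k : Int)))
      (fun p hp j hj1 hj2 => by
        have h1 := hmem p hp
        have h2 := hMmax p.2 h1.2.2
        dsimp only
        constructor <;> omega)
      (fun k hk p hp j hj1 hj2 => by
        have h1 := hmem p hp
        dsimp only
        constructor <;> intro h <;> omega)]
  rfl
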